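-- pv_equiv track=rewrite | github.com/KimperYang/KVMemory | src/data/compress.py | insert_mem_tokens
-- ===== SOURCE A (Python) =====
-- def insert_mem_tokens(
--     original_list,    # e.g. [1,2,3,4,5,6,7,8]
--     ranges,           # list of [start, end) half-open intervals
--     new_token,        # e.g. [100, 1000]
--     start_number,     # e.g. -111
--     end_number        # e.g. -999
-- ):
--     """
--     Insert:
--       - `start_number` before the *first* range slice
--       - `new_token`    after *each* range slice
--       - `end_number`   after the *last* range slice
--     Return (new_list, new_ranges)
--       where new_ranges are the half-open intervals adjusted in the new list.
--     """
--     result_list = []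
--     new_ranges = []
--     offset = 0
--
--     # Keep track of the last included index from old list.
--     # For half-open [s,e), the last included old index is e-1.
--     prev_included = -1
--
--     # Sort ranges by their start just in case
--     # sorted_ranges = sorted(ranges, key=lambda x: x[0])
--     sorted_ranges =ranges
--
--     for i, (start, end) in enumerate(sorted_ranges):
--         is_first_range = (i == 0)
--         is_last_range  = (i == len(sorted_ranges) - 1)
--
--         # 1) Append all elements between the last included and (start-1)
--         result_list.extend(original_list[prev_included + 1 : start])
--
--         # 2) If this is the first range, insert the start_number
--         if is_first_range:
--             result_list.append(start_number)
--             offset += 1  # We inserted 1 extra item in the new list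
--
--         # 3) Append the slice [start, end)
--         result_list.extend(original_list[start : end])
--
--         # 4) Record the new half-open range [start+offset, end+offset)
--         new_start = start + offset
--         new_end   = end   + offset
--         new_ranges.append([new_start, new_end])
--
--         # 5) Insert the token after this range
--         result_list.extend(new_token)
--         offset += len(new_token)
--
--         # 6) If this is the last range, insert the end_number
--         if is_last_range:
--             result_list.append(end_number)
--             offset += 1
--
--         # 7) Update prev_included
--         prev_included = end - 1
--
--     # 8) Append any leftover elements after the last range
--     result_list.extend(original_list[prev_included + 1 : ])
--
--     return result_list, new_ranges
-- ===== SOURCE B (Python) =====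
-- def insert_mem_tokens(original_list, ranges, new_token, start_number, end_number):
--     # Staged decomposition, output built back-to-front: new_ranges comes from a
--     # closed-form offset comprehension; each range is paired with its
--     # predecessor's end, and a reverse walk prepends gap+span+token blocks in
--     # front of the already-built suffix (end marker + tail), so no running
--     # offset or prev_included state is carried.
--     L = len(new_token)
--     new_ranges = [[s + 1 + i * L, e + 1 + i * L] for i, (s, e) in enumerate(ranges)]
--     if not ranges:
--         return original_list[:], []
--     prev_ends = [None] + [r[1] for r in ranges]
--     pairs = list(zip(ranges, prev_ends))
--     acc = [end_number] + original_list[ranges[-1][1]:]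
--     for (s, e), pe in reversed(pairs):
--         gap = original_list[0:s] + [start_number] if pe is None else original_list[pe:s]
--         acc = gap + original_list[s:e] + new_token + acc
--     return acc, new_ranges
-- ===== Notes on version B (the rewrite author's own statement) =====
-- stated objective: alternative
-- what changed: B drops A's single forward pass with carried state (running offset, prev_included): new_ranges is computed up front by a comprehension with the closed-form offset 1 + i*len(new_token), each range is paired with its predecessor's end via a zip, and the result list is built back-to-front by a reverse walk that prepends gap+span+token blocks onto the suffix (end marker + tail).
import Mathlib
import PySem

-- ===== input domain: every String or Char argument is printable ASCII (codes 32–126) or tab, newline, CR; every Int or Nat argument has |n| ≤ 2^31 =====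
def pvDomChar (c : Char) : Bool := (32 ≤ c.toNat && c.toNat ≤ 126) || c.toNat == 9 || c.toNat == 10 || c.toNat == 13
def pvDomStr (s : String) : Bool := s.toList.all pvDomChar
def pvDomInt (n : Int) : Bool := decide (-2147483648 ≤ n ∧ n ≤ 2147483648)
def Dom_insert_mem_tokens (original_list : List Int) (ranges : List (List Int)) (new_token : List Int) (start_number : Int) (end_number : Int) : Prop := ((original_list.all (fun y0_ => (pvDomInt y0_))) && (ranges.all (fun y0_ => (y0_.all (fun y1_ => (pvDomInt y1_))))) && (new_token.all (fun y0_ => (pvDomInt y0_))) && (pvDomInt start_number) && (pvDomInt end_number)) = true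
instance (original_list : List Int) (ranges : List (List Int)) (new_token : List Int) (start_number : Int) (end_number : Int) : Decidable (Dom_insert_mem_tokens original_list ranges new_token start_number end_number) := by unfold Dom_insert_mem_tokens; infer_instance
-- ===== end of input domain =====

-- B builds the output back-to-front: new_ranges comes from a closed-form offset comprehension,
-- each range is paired with its predecessor's end, and a reverse walk prepends gap+span+token
-- blocks in front of the already-built suffix; objective: alternative decomposition, same cost.

-- unpacking 'start, end = r' of a two-element list (Pre_ guarantees length 2)
def pvFst2 (r : List Int) : Int := r.headD 0
def pvSnd2 (r : List Int) : Int := r.tail.headD 0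

-- ===== PORT A =====
-- the for-loop over enumerate(ranges) with state (result_list, new_ranges, offset, prev_included)
def insertMemLoopA (ol tok : List Int) (sn en : Int) (n : Int) :
    List (Int × List Int) → (List Int × List (List Int) × Int × Int) → List Int × List (List Int) × Int × Int
  | [], st => st
  | (i, r) :: rest, (res, nr, off, prev) =>
    let s := pvFst2 r
    let e := pvSnd2 r
    let res1 := res ++ PySem.List.slice ol (some (prev + 1)) (some s)
    let res2 := if i = 0 then res1 ++ [sn] else res1
    let off1 := if i = 0 then off + 1 else off
    let res3 := res2 ++ PySem.List.slice ol (some s) (some e)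
    let nr1 := nr ++ [[s + off1, e + off1]]
    let res4 := res3 ++ tok
    let off2 := off1 + (tok.length : Int)
    let res5 := if i = n - 1 then res4 ++ [en] else res4
    let off3 := if i = n - 1 then off2 + 1 else off2
    insertMemLoopA ol tok sn en n rest (res5, nr1, off3, e - 1)

def insert_mem_tokens (original_list : List Int) (ranges : List (List Int)) (new_token : List Int) (start_number : Int) (end_number : Int) : List Int × List (List Int) :=
  let st := insertMemLoopA original_list new_token start_number end_number (ranges.length : Int)
              (PySem.List.enumerate ranges 0) ([], [], 0, -1)
  (st.1 ++ PySem.List.slice original_list (some (st.2.2.2 + 1)) none, st.2.1)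

-- ===== PORT B =====
-- the reverse walk 'for (s, e), pe in reversed(pairs): acc = gap + span + tok + acc'
def insertMemLoopB (ol tok : List Int) (sn : Int) :
    List (List Int × Option Int) → List Int → List Int
  | [], acc => acc
  | (r, pe) :: rest, acc =>
      let s := pvFst2 r
      let e := pvSnd2 r
      let gap := match pe with
        | none => PySem.List.slice ol (some 0) (some s) ++ [sn]
        | some p => PySem.List.slice ol (some p) (some s)
      insertMemLoopB ol tok sn rest
        (gap ++ PySem.List.slice ol (some s) (some e) ++ tok ++ acc)

def insert_mem_tokens_alt (original_list : List Int) (ranges : List (List Int)) (new_token : List Int) (start_number : Int) (end_number : Int) : List Int × List (List Int) :=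
  let L : Int := new_token.length
  let newRanges := (PySem.List.enumerate ranges 0).map
      (fun p => [pvFst2 p.2 + 1 + p.1 * L, pvSnd2 p.2 + 1 + p.1 * L])
  match ranges with
  | [] => (PySem.List.slice original_list none none, [])
  | _ :: _ =>
    -- prev_ends = [None] + [r[1] for r in ranges]; pairs = zip(ranges, prev_ends)
    let prevEnds : List (Option Int) := none :: ranges.map (fun r => some (pvSnd2 r))
    let pairs := ranges.zip prevEnds
    -- ranges[-1] on a list known nonempty = getLastD (exact here)
    let acc := end_number :: PySem.List.slice original_list (some (pvSnd2 (ranges.getLastD []))) none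
    (insertMemLoopB original_list new_token start_number pairs.reverse acc, newRanges)

-- ===== PRECONDITION & SPEC =====
-- Pre_ excludes exactly the inputs where Python A raises: 'start, end = r' raises ValueError
-- unless every range has exactly two elements.
def Pre_insert_mem_tokens (original_list : List Int) (ranges : List (List Int)) (new_token : List Int) (start_number : Int) (end_number : Int) : Prop :=
  ∀ r ∈ ranges, r.length = 2
instance (original_list : List Int) (ranges : List (List Int)) (new_token : List Int) (start_number : Int) (end_number : Int) : Decidable (Pre_insert_mem_tokens original_list ranges new_token start_number end_number) := by unfold Pre_insert_mem_tokens; infer_instance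

def pvWitness_insert_mem_tokens : List Int × List (List Int) × List Int × Int × Int :=
  ([1, 2, 3, 4, 5, 6, 7, 8], [[1, 3], [5, 6]], [100, 1000], -111, -999)

def Spec_insert_mem_tokens (original_list : List Int) (ranges : List (List Int)) (new_token : List Int) (start_number : Int) (end_number : Int) (out : List Int × List (List Int)) : Prop := out = insert_mem_tokens_alt original_list ranges new_token start_number end_number
instance (original_list : List Int) (ranges : List (List Int)) (new_token : List Int) (start_number : Int) (end_number : Int) (out : List Int × List (List Int)) : Decidable (Spec_insert_mem_tokens original_list ranges new_token start_number end_number out) := by unfold Spec_insert_mem_tokens; infer_instance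

-- ===== CLAIM (what is proved, stated in full; the proofs are below) =====
def Claim_equal_insert_mem_tokens : Prop := ∀ (original_list : List Int) (ranges : List (List Int)) (new_token : List Int) (start_number : Int) (end_number : Int), Dom_insert_mem_tokens original_list ranges new_token start_number end_number → Pre_insert_mem_tokens original_list ranges new_token start_number end_number → Spec_insert_mem_tokens original_list ranges new_token start_number end_number (insert_mem_tokens original_list ranges new_token start_number end_number)

-- ===== LEMMAS AND PROOFS =====

-- the block B prepends for one (range, predecessor-end) pair
def blockFn (ol tok : List Int) (sn : Int) (z : List Int × Option Int) : List Int :=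
  (match z.2 with
   | none => PySem.List.slice ol (some 0) (some (pvFst2 z.1)) ++ [sn]
   | some p => PySem.List.slice ol (some p) (some (pvFst2 z.1)))
  ++ PySem.List.slice ol (some (pvFst2 z.1)) (some (pvSnd2 z.1)) ++ tok

lemma loopB_eq (ol tok : List Int) (sn : Int) :
    ∀ (l : List (List Int × Option Int)) (acc : List Int),
      insertMemLoopB ol tok sn l acc
        = (l.reverse.map (blockFn ol tok sn)).flatten ++ acc := by
  intro l
  induction l with
  | nil => intro acc; simp [insertMemLoopB]
  | cons z rest ih =>
      obtain ⟨r, pe⟩ := z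
      intro acc
      cases pe <;>
        simp [insertMemLoopB, ih, blockFn, List.append_assoc]

-- the tail of A's new_ranges, starting from a given offset
def nrFrom (L : Int) : Int → List (List Int) → List (List Int)
  | _, [] => []
  | off, r :: l => [pvFst2 r + off, pvSnd2 r + off] :: nrFrom L (off + L) l

lemma nrEq (L : Int) : ∀ (l : List (List Int)) (i : Int),
    (PySem.List.enumerate l i).map
      (fun p => [pvFst2 p.2 + 1 + p.1 * L, pvSnd2 p.2 + 1 + p.1 * L])
      = nrFrom L (1 + i * L) l := by
  intro l
  induction l with
  | nil => intro i; simp [nrFrom, PySem.List.enumerate_nil]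
  | cons r l ih =>
      intro i
      rw [PySem.List.enumerate_cons, List.map_cons, ih (i + 1)]
      simp only [nrFrom]
      congr 1
      · simp only [List.cons.injEq, and_true]
        constructor <;> ring
      · congr 1
        ring

lemma getLastD_cons_cons {α : Type} (a b : α) (l : List α) (d : α) :
    (a :: b :: l).getLastD d = (b :: l).getLastD d := by
  simp [List.getLastD]

lemma loopA_tail (ol tok : List Int) (sn en : Int) (n : Int) :
    ∀ (l : List (List Int)) (r p : List Int) (k : Int) (res : List Int)
      (nr : List (List Int)) (off : Int),
      1 ≤ k → k + (l.length : Int) + 1 = n →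
      insertMemLoopA ol tok sn en n (PySem.List.enumerate (r :: l) k) (res, nr, off, pvSnd2 p - 1)
        = (res ++ (((r :: l).zip ((p :: r :: l).map (fun q => some (pvSnd2 q)))).map
              (blockFn ol tok sn)).flatten ++ [en],
           nr ++ nrFrom (tok.length : Int) off (r :: l),
           off + ((r :: l).length : Int) * (tok.length : Int) + 1,
           pvSnd2 ((r :: l).getLastD []) - 1) := by
  intro l
  induction l with
  | nil =>
      intro r p k res nr off hk hn
      simp only [List.length_nil, Int.natCast_zero] at hn
      have h1 : ¬ k = 0 := by omega
      have h2 : k = n - 1 := by omega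
      rw [PySem.List.enumerate_cons, PySem.List.enumerate_nil]
      simp only [insertMemLoopA, List.zip, List.zipWith, List.map, nrFrom, blockFn,
        List.flatten, if_neg h1, if_pos h2, Prod.mk.injEq]
      refine ⟨?_, by trivial, ?_, ?_⟩
      · simp [sub_add_cancel, List.append_assoc]
      · push_cast [List.length_cons, List.length_nil]
        ring
      · simp [List.getLastD]
  | cons r2 l ih =>
      intro r p k res nr off hk hn
      simp only [List.length_cons] at hn
      have h1 : ¬ k = 0 := by omega
      have h2 : ¬ k = n - 1 := by push_cast at hn ⊢; omega
      rw [PySem.List.enumerate_cons]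
      simp only [insertMemLoopA, if_neg h1, if_neg h2]
      rw [ih r2 r (k + 1) _ _ _ (by omega) (by push_cast at hn ⊢; omega)]
      simp only [List.zip, List.zipWith, List.map, List.flatten, blockFn, nrFrom,
        getLastD_cons_cons, Prod.mk.injEq]
      refine ⟨by simp [sub_add_cancel, List.append_assoc], ?_, ?_, by trivial⟩
      · simp [List.append_assoc]
      · push_cast [List.length_cons]
        ring

theorem insert_mem_tokens_spec_aux (original_list : List Int) (ranges : List (List Int)) (new_token : List Int) (start_number : Int) (end_number : Int) :
    insert_mem_tokens original_list ranges new_token start_number end_number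
      = insert_mem_tokens_alt original_list ranges new_token start_number end_number := by
  match ranges with
  | [] =>
      simp [insert_mem_tokens, insert_mem_tokens_alt, insertMemLoopA,
        PySem.List.enumerate_nil]
  | [r] =>
      simp only [insert_mem_tokens, insert_mem_tokens_alt,
        PySem.List.enumerate_cons, PySem.List.enumerate_nil, insertMemLoopA,
        List.map, List.zip, List.zipWith, List.reverse, List.reverseAux,
        insertMemLoopB, List.length_cons, List.length_nil, List.getLastD,
        Prod.mk.injEq]
      norm_num [List.append_assoc]
  | r :: r2 :: l =>
      have hlen : ((r :: r2 :: l).length : Int) = (l.length : Int) + 2 := by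
        simp
        omega
      have h2 : ¬ (0 : Int) = ((r :: r2 :: l).length : Int) - 1 := by
        rw [hlen]; omega
      simp only [insert_mem_tokens, insert_mem_tokens_alt]
      rw [nrEq new_token.length]
      rw [PySem.List.enumerate_cons]
      simp only [insertMemLoopA, if_neg h2]
      rw [show ((0 : Int) + 1) = 1 from rfl, show ((-1 : Int) + 1) = 0 from rfl]
      rw [loopA_tail original_list new_token start_number end_number _ l r2 r 1 _ _ _
        (by omega) (by rw [hlen]; ring)]
      rw [loopB_eq]
      simp only [List.reverse_reverse, List.map, List.zip, List.zipWith,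
        List.flatten, blockFn, getLastD_cons_cons, Prod.mk.injEq]
      constructor
      · simp [sub_add_cancel, List.append_assoc]
      · rw [show (1 : Int) + 0 * (new_token.length : Int) = 1 from by ring]
        simp [nrFrom]

-- ===== VERDICT (by name: the statement is the Claim_ definition above) =====
theorem insert_mem_tokens_spec : Claim_equal_insert_mem_tokens := by
  intro ol ranges tok sn en _ _
  unfold Spec_insert_mem_tokens
  exact insert_mem_tokens_spec_aux ol ranges tok sn en
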